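-- pv_equiv track=rewrite | github.com/tariq-ahmad/get_unique_airports_count | Get_unique_airports_count.py | get_unique_airports
-- ===== SOURCE A (Python) =====
-- def get_unique_airports(airport_data):
--     # Function to get unique airports from the file. Takes in the airport list data as input. Returns dictionary of unique airport.
--     unique_airports = {}
--     for airport in airport_data[1:]:
--         airport_name=airport[1].replace('"','')
--         if airport_name in unique_airports.keys():
--             unique_airports[airport_name] +=1
--         else:
--             unique_airports[airport_name] =1
--     return unique_airports
-- ===== SOURCE B (Python) =====
-- def get_unique_airports(airport_data):
--     # Build the cleaned name list once, then count each distinct name with list.count,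
--     # iterating the distinct names in first-occurrence order (dict.fromkeys).
--     names = [row[1].replace('"', '') for row in airport_data[1:]]
--     return {name: names.count(name) for name in dict.fromkeys(names)}
-- ===== Notes on version B (the rewrite author's own statement) =====
-- stated objective: alternative
-- what changed: Replaces the incremental membership-test-and-tally dict loop by a two-phase pass: build the cleaned-name list, dedup it in first-occurrence order with dict.fromkeys, and count each distinct name via list.count in a dict comprehension.
import Mathlib
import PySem

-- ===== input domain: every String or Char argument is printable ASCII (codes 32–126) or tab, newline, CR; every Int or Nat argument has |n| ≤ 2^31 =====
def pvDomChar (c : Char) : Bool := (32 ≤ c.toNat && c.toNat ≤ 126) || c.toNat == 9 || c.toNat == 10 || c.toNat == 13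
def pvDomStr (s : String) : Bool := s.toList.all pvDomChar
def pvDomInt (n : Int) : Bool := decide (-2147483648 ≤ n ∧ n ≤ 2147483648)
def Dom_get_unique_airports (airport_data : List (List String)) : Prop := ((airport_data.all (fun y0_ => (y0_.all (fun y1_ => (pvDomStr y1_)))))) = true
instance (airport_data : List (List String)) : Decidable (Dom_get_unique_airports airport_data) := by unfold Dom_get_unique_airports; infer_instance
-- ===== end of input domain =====

-- B replaces A's incremental membership-test-and-tally dict loop by a two-phase pass
-- (clean-name list, ordered dedup, per-name list.count) — alternative decomposition, same results.


-- ===== PORT A =====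
-- airport[1].replace('"','') ; the .getD "" default is unreachable under Pre_ (row[1] exists)
def pvRowName (row : List String) : String :=
  PySem.Str.replace ((PySem.List.pyGet? row 1).getD "") "\"" ""

def get_unique_airports (airport_data : List (List String)) : List (String × Int) :=
  ((PySem.List.slice airport_data (some 1) none).foldl
    (fun (d : PySem.Dict String Int) row =>
      let airport_name := pvRowName row
      match PySem.Dict.get? d airport_name with
      | some v => PySem.Dict.insert d airport_name (v + 1)
      | none   => PySem.Dict.insert d airport_name 1)
    (PySem.Dict.empty : PySem.Dict String Int)).items

-- ===== PORT B =====
def get_unique_airports_alt (airport_data : List (List String)) : List (String × Int) :=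
  let names := (PySem.List.slice airport_data (some 1) none).map pvRowName
  (PySem.List.dedup names).map (fun name => (name, (names.count name : Int)))

-- ===== PRECONDITION & SPEC =====
-- Pre_ excludes exactly the inputs where a data row has fewer than 2 fields: there A raises IndexError on row[1].
def Pre_get_unique_airports (airport_data : List (List String)) : Prop :=
  ∀ row ∈ PySem.List.slice airport_data (some 1) none, 2 ≤ row.length
instance (airport_data : List (List String)) : Decidable (Pre_get_unique_airports airport_data) := by unfold Pre_get_unique_airports; infer_instance

def pvWitness_get_unique_airports : List (List String) :=
  [["id", "name"], ["1", "\"JFK\""], ["2", "JFK"], ["3", "\"LAX\""]]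

def Spec_get_unique_airports (airport_data : List (List String)) (out : List (String × Int)) : Prop := out = get_unique_airports_alt airport_data
instance (airport_data : List (List String)) (out : List (String × Int)) : Decidable (Spec_get_unique_airports airport_data out) := by unfold Spec_get_unique_airports; infer_instance

-- ===== CLAIM (what is proved, stated in full; the proofs are below) =====
def Claim_equal_get_unique_airports : Prop := ∀ (airport_data : List (List String)), Dom_get_unique_airports airport_data → Pre_get_unique_airports airport_data → Spec_get_unique_airports airport_data (get_unique_airports airport_data)

-- ===== LEMMAS AND PROOFS =====
-- A's branching step is the standard counter step.
lemma step_eq_counter_step (d : PySem.Dict String Int) (name : String) :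
    (match PySem.Dict.get? d name with
      | some v => PySem.Dict.insert d name (v + 1)
      | none   => PySem.Dict.insert d name 1)
      = PySem.Dict.insert d name (PySem.Dict.getD d name 0 + 1) := by
  cases h : PySem.Dict.get? d name with
  | some v => simp [PySem.Dict.getD_eq_get?_getD, h]
  | none => simp [PySem.Dict.getD_eq_get?_getD, h]

lemma foldA_eq (rows : List (List String)) (d : PySem.Dict String Int) :
    rows.foldl
      (fun (d : PySem.Dict String Int) row =>
        let airport_name := pvRowName row
        match PySem.Dict.get? d airport_name with
        | some v => PySem.Dict.insert d airport_name (v + 1)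
        | none   => PySem.Dict.insert d airport_name 1) d
    = (rows.map pvRowName).foldl
        (fun d x => PySem.Dict.insert d x (PySem.Dict.getD d x 0 + 1)) d := by
  induction rows generalizing d with
  | nil => rfl
  | cons r rs ih =>
    simp only [List.foldl_cons, List.map_cons]
    rw [step_eq_counter_step]
    exact ih _

-- ===== VERDICT (by name: the statement is the Claim_ definition above) =====
theorem get_unique_airports_spec : Claim_equal_get_unique_airports := by
  intro airport_data _ _
  unfold Spec_get_unique_airports get_unique_airports get_unique_airports_alt
  rw [foldA_eq, PySem.Dict.foldl_insert_getD_add_one_eq_counter, PySem.Dict.items_counter]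
  simp [PySem.List.dedup_eq_ofList]
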